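-- pv_equiv track=rewrite | github.com/jted0537/CRA_SSDProject | virtual_ssd/command_buffer/contents/optimizer.py | __remove_redundancy
-- ===== SOURCE A (Python) =====
-- import copy
--
-- def __remove_redundancy(command_buffer: list, remove_map: list):
--     optimized_buffer = copy.copy(command_buffer)
--
--     for i in range(len(command_buffer) - 1, -1, -1):
--         if remove_map[i] or (
--             optimized_buffer[i][0] == "E"
--             and optimized_buffer[i][2] == 0
--             # Remove zero erase operation case created by optimization
--         ):
--
--             del optimized_buffer[i]
--
--     return optimized_buffer
-- ===== SOURCE B (Python) =====
-- def __remove_redundancy(command_buffer: list, remove_map: list):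
--     return [
--         cmd
--         for cmd, flagged in zip(command_buffer, remove_map)
--         if not flagged and not (cmd[0] == "E" and cmd[2] == 0)
--     ]
-- ===== Notes on version B (the rewrite author's own statement) =====
-- stated objective: faster
-- what changed: Replaces the backward loop with in-place deletions on a copied list by a single forward pass that builds the filtered list directly (zip + comprehension).
import Mathlib
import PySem

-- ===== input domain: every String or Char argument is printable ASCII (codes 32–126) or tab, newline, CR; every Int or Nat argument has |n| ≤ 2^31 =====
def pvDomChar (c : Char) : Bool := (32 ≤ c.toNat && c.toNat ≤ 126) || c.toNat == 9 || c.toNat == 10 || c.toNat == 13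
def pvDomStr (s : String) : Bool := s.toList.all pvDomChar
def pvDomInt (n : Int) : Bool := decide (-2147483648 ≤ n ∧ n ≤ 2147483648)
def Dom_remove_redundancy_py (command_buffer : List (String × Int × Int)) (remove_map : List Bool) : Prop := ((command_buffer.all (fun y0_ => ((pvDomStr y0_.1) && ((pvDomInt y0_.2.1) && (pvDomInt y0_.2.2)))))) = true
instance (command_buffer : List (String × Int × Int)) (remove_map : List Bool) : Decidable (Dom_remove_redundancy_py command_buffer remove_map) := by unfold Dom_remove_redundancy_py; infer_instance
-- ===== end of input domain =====

-- B replaces A's backward in-place-deletion loop by one forward pass building the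
-- filtered list (objective: faster, O(n) vs A's O(n^2) deletions).

-- ===== PORT A =====
-- the backward for-loop 'for i in range(len(cb)-1, -1, -1)' as a downward recursion on i+1;
-- remove_map[i] is read with getD false: Pre_ guarantees i < remove_map.length, so the
-- default is never used on admitted inputs (A raises IndexError exactly when it is out of range);
-- optimized_buffer[i] is always in range in A (only indices > i were deleted), ported via [i]?
def rrGoA (remove_map : List Bool) : Nat → List (String × Int × Int) → List (String × Int × Int)
  | 0, buf => buf
  | (i+1), buf =>
      let cond :=
        remove_map.getD i false ||
          (match buf[i]? with
           | some c => c.1 == "E" && c.2.2 == 0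
           | none => false)
      rrGoA remove_map i (if cond then buf.eraseIdx i else buf)

def remove_redundancy_py (command_buffer : List (String × Int × Int)) (remove_map : List Bool) : List (String × Int × Int) :=
  rrGoA remove_map command_buffer.length command_buffer

-- ===== PORT B =====
def remove_redundancy_py_alt (command_buffer : List (String × Int × Int)) (remove_map : List Bool) : List (String × Int × Int) :=
  (command_buffer.zip remove_map).filterMap (fun p =>
    if !p.2 && !(p.1.1 == "E" && p.1.2.2 == 0) then some p.1 else none)

-- ===== PRECONDITION & SPEC =====
-- Pre_ excludes exactly the inputs where A raises IndexError reading remove_map[i]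
-- (i.e. remove_map shorter than command_buffer); on those B's zip would simply truncate.
def Pre_remove_redundancy_py (command_buffer : List (String × Int × Int)) (remove_map : List Bool) : Prop :=
  command_buffer.length ≤ remove_map.length
instance (command_buffer : List (String × Int × Int)) (remove_map : List Bool) : Decidable (Pre_remove_redundancy_py command_buffer remove_map) := by unfold Pre_remove_redundancy_py; infer_instance

def pvWitness_remove_redundancy_py : (List (String × Int × Int)) × List Bool :=
  ([("E", 1, 0), ("W", 2, 3)], [false, true])

def Spec_remove_redundancy_py (command_buffer : List (String × Int × Int)) (remove_map : List Bool) (out : List (String × Int × Int)) : Prop := out = remove_redundancy_py_alt command_buffer remove_map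
instance (command_buffer : List (String × Int × Int)) (remove_map : List Bool) (out : List (String × Int × Int)) : Decidable (Spec_remove_redundancy_py command_buffer remove_map out) := by unfold Spec_remove_redundancy_py; infer_instance

-- ===== CLAIM (what is proved, stated in full; the proofs are below) =====
def Claim_equal_remove_redundancy_py : Prop := ∀ (command_buffer : List (String × Int × Int)) (remove_map : List Bool), Dom_remove_redundancy_py command_buffer remove_map → Pre_remove_redundancy_py command_buffer remove_map → Spec_remove_redundancy_py command_buffer remove_map (remove_redundancy_py command_buffer remove_map)

-- ===== LEMMAS AND PROOFS =====

-- core invariant: processing indices front.length-1 .. 0 on front ++ tail filters front and leaves tail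
lemma rrGoA_spec : ∀ (front : List (String × Int × Int)) (rm1 rm2 : List Bool)
    (tail : List (String × Int × Int)), rm1.length = front.length →
    rrGoA (rm1 ++ rm2) front.length (front ++ tail) =
      remove_redundancy_py_alt front rm1 ++ tail := by
  intro front
  induction front using List.reverseRecOn with
  | nil =>
    intro rm1 rm2 tail h
    have : rm1 = [] := List.eq_nil_of_length_eq_zero h
    simp [this, rrGoA, remove_redundancy_py_alt]
  | append_singleton f x ih =>
    intro rm1 rm2 tail h
    simp at h
    obtain ⟨r1, b, rfl⟩ : ∃ r1 b, rm1 = r1 ++ [b] := by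
      rcases rm1.eq_nil_or_concat with rfl | ⟨r1, b, rfl⟩
      · simp at h
      · exact ⟨r1, b, by simp⟩
    simp at h
    rw [show (f ++ [x]).length = f.length + 1 by simp]
    have hrm2 : (r1 ++ b :: rm2)[f.length]? = some b := by
      rw [← h, List.getElem?_append_right (le_refl _)]
      simp
    have hgo : rrGoA (r1 ++ [b] ++ rm2) (f.length + 1) ((f ++ [x]) ++ tail) =
        rrGoA (r1 ++ [b] ++ rm2) f.length
          (if (b || (x.1 == "E" && x.2.2 == 0)) then f ++ tail else f ++ ([x] ++ tail)) := by
      have hget : ((f ++ [x]) ++ tail)[f.length]? = some x := by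
        rw [List.append_assoc, List.getElem?_append_right (le_refl _)]
        simp
      have herase : ((f ++ [x]) ++ tail).eraseIdx f.length = f ++ tail := by
        rw [List.append_assoc, List.eraseIdx_append_of_length_le (le_refl _)]
        simp
      simp only [rrGoA, hget, herase]
      by_cases hc : (b || (x.1 == "E" && x.2.2 == 0)) = true
      · rw [if_pos hc]
        rcases Bool.or_eq_true_iff.mp hc with hb | hx
        · subst hb
          simp [hrm2]
        · have hx' : x.1 = "E" ∧ x.2.2 = 0 := by simpa using hx
          simp [hrm2, hx']
      · rw [if_neg hc]
        have hb : b = false := by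
          rcases b with _ | _
          · rfl
          · simp at hc
        have hx' : ¬(x.1 = "E" ∧ x.2.2 = 0) := by
          intro hh
          exact hc (by simp [hh.1, hh.2])
        subst hb
        simp [hrm2, hx']
    rw [hgo]
    by_cases hc : (b || (x.1 == "E" && x.2.2 == 0)) = true
    · rw [if_pos hc]
      have hrec := ih r1 ([b] ++ rm2) tail h
      rw [← List.append_assoc] at hrec
      rw [hrec]
      have halt : remove_redundancy_py_alt (f ++ [x]) (r1 ++ [b]) =
          remove_redundancy_py_alt f r1 := by
        unfold remove_redundancy_py_alt
        rw [List.zip_append h.symm]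
        simp only [List.filterMap_append]
        rcases Bool.or_eq_true_iff.mp hc with hb | hx
        · simp [hb]
        · have hx' : x.1 = "E" ∧ x.2.2 = 0 := by simpa using hx
          simp [hx']
      rw [halt]
    · rw [if_neg hc]
      have hrec := ih r1 ([b] ++ rm2) ([x] ++ tail) h
      rw [← List.append_assoc] at hrec
      rw [hrec]
      have hb : b = false := by
        rcases b with _ | _
        · rfl
        · simp at hc
      have hx' : ¬(x.1 = "E" ∧ x.2.2 = 0) := by
        intro hh
        exact hc (by simp [hh.1, hh.2])
      have halt : remove_redundancy_py_alt (f ++ [x]) (r1 ++ [b]) =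
          remove_redundancy_py_alt f r1 ++ [x] := by
        unfold remove_redundancy_py_alt
        rw [List.zip_append h.symm]
        simp [hb, not_and_or.mp hx']
      rw [halt, List.append_assoc]

lemma zip_take_self {α β : Type} : ∀ (cb : List α) (rm : List β), cb.zip (rm.take cb.length) = cb.zip rm
  | [], _ => by simp
  | _ :: _, [] => by simp
  | a :: cb, b :: rm => by simp [zip_take_self cb rm]

-- zip truncates remove_map, so B only reads its first command_buffer.length entries
lemma alt_take (cb : List (String × Int × Int)) (rm : List Bool) :
    remove_redundancy_py_alt cb (rm.take cb.length) = remove_redundancy_py_alt cb rm := by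
  unfold remove_redundancy_py_alt
  rw [zip_take_self cb rm]


-- ===== VERDICT (by name: the statement is the Claim_ definition above) =====
theorem remove_redundancy_py_spec : Claim_equal_remove_redundancy_py := by
  intro cb rm _ hpre
  unfold Spec_remove_redundancy_py remove_redundancy_py
  have hsplit : rm = rm.take cb.length ++ rm.drop cb.length := (List.take_append_drop _ _).symm
  have hlen : (rm.take cb.length).length = cb.length := List.length_take_of_le hpre
  calc rrGoA rm cb.length cb
      = rrGoA (rm.take cb.length ++ rm.drop cb.length) cb.length (cb ++ []) := by
        rw [← hsplit, List.append_nil]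
    _ = remove_redundancy_py_alt cb (rm.take cb.length) ++ [] :=
        rrGoA_spec cb _ _ [] hlen
    _ = remove_redundancy_py_alt cb rm := by rw [List.append_nil, alt_take]
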